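-- pv_equiv track=rewrite | github.com/diginc/HotSBuildCheatSheets | hotslogslog.py | format_talents_shorthand
-- ===== SOURCE A (Python) =====
-- def format_talents_shorthand(build):
--     buildStr = ''
--     for tier,talentNum in enumerate(build):
--         if tier == 3:
--             buildStr = buildStr +'-'+ str(talentNum) +'-'
--         else:
--             buildStr = buildStr + str(talentNum)
--     return buildStr
-- ===== SOURCE B (Python) =====
-- def format_talents_shorthand(build):
--     parts = [str(x) for x in build]
--     if len(parts) > 3:
--         return ''.join(parts[:3]) + '-' + parts[3] + '-' + ''.join(parts[4:])
--     return ''.join(parts)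
-- ===== Notes on version B (the rewrite author's own statement) =====
-- stated objective: simpler
-- what changed: Replaces the per-element loop with a conditional branch on tier 3 by stringifying all talents once and joining three positional segments (before tier 3, tier 3, after) around literal dashes.
import Mathlib
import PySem

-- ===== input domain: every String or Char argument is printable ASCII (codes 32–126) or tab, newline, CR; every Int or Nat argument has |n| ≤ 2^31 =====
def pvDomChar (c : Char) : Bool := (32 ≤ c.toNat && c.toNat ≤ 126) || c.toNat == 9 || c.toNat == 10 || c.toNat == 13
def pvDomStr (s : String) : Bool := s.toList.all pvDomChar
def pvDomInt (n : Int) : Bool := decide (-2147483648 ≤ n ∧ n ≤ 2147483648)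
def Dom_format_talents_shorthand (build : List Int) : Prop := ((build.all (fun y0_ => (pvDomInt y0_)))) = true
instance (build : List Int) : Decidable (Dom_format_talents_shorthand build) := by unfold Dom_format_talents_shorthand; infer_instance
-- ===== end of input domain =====

-- B rewrites A's per-element loop as a segment join around the tier-3 element: simpler decomposition, same O(n) cost.

-- ===== PORT A =====
def format_talents_shorthand (build : List Int) : String :=
  (PySem.List.enumerate build).foldl
    (fun buildStr p =>
      if p.1 = 3 then buildStr ++ "-" ++ PySem.Int.toStr p.2 ++ "-"
      else buildStr ++ PySem.Int.toStr p.2) ""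

-- ===== PORT B =====
def format_talents_shorthand_alt (build : List Int) : String :=
  let parts := build.map PySem.Int.toStr
  if parts.length > 3 then
    PySem.Str.join "" (parts.take 3) ++ "-" ++ ((PySem.List.pyGet? parts 3).getD "") ++ "-" ++
      PySem.Str.join "" (parts.drop 4)
  else
    PySem.Str.join "" parts

-- ===== PRECONDITION & SPEC =====
def Spec_format_talents_shorthand (build : List Int) (out : String) : Prop := out = format_talents_shorthand_alt build
instance (build : List Int) (out : String) : Decidable (Spec_format_talents_shorthand build out) := by unfold Spec_format_talents_shorthand; infer_instance

-- ===== CLAIM (what is proved, stated in full; the proofs are below) =====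
def Claim_equal_format_talents_shorthand : Prop := ∀ (build : List Int), Dom_format_talents_shorthand build → Spec_format_talents_shorthand build (format_talents_shorthand build)

-- ===== LEMMAS AND PROOFS =====

theorem pv_join_empty_cons (x : String) (xs : List String) :
    PySem.Str.join "" (x :: xs) = x ++ PySem.Str.join "" xs := by
  apply String.ext
  cases xs with
  | nil => simp [PySem.Chars.join_singleton, PySem.Chars.join_nil]
  | cons y ys => simp [PySem.Chars.join_cons_cons]

theorem pv_join_empty_nil : PySem.Str.join "" ([] : List String) = "" := by
  apply String.ext
  simp [PySem.Chars.join_nil]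

-- A's loop over tiers ≥ 4 never hits the tier-3 branch: it appends the plain digits.
theorem pv_tailFold (rest : List Int) (s : Int) (acc : String) (hs : 4 ≤ s) :
    (PySem.List.enumerate rest s).foldl
      (fun buildStr p =>
        if p.1 = 3 then buildStr ++ "-" ++ PySem.Int.toStr p.2 ++ "-"
        else buildStr ++ PySem.Int.toStr p.2) acc
      = acc ++ PySem.Str.join "" (rest.map PySem.Int.toStr) := by
  induction rest generalizing s acc with
  | nil => simp [PySem.List.enumerate_nil, pv_join_empty_nil]
  | cons x xs ih =>
    rw [PySem.List.enumerate_cons, List.foldl_cons]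
    have hne : s ≠ 3 := by omega
    simp only [hne, if_false]
    rw [ih (s + 1) _ (by omega), List.map_cons, pv_join_empty_cons]
    simp [String.append_assoc]

-- ===== VERDICT (by name: the statement is the Claim_ definition above) =====
theorem format_talents_shorthand_spec : Claim_equal_format_talents_shorthand := by
  intro build _
  unfold Spec_format_talents_shorthand format_talents_shorthand format_talents_shorthand_alt
  match build with
  | [] => simp [PySem.List.enumerate_nil, pv_join_empty_nil]
  | [a] =>
    simp [PySem.List.enumerate_cons, PySem.List.enumerate_nil, pv_join_empty_cons, pv_join_empty_nil]
  | [a, b] =>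
    simp [PySem.List.enumerate_cons, PySem.List.enumerate_nil, pv_join_empty_cons, pv_join_empty_nil]
  | [a, b, c] =>
    simp [PySem.List.enumerate_cons, PySem.List.enumerate_nil, pv_join_empty_cons, pv_join_empty_nil,
      String.append_assoc]
  | a :: b :: c :: d :: rest =>
    simp only [PySem.List.enumerate_cons, List.foldl_cons, List.map_cons, List.length_cons]
    norm_num
    rw [pv_tailFold rest 4 _ (by omega)]
    simp [PySem.List.pyGet?, PySem.List.pyIdx?, pv_join_empty_cons, pv_join_empty_nil,
      String.append_assoc]
    have h : ((3:Int) ≤ (rest.length:Int) + 1 + 1 + 1) := by omega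
    simp [h]
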